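-- pv_equiv track=rewrite | github.com/osuiso-depot/prompt_chunk_ex | prompts_from_file_ex.py | process_chunk_string
-- ===== SOURCE A (Python) =====
-- def process_chunk_string(chunk_string: str):
--     """
--     チャンク文字列をプロンプトリストに変換する
--     """
--     processed_sections = []
--     content = chunk_string.splitlines()
--     content_length = len(content)
--     i = 0
--     while i < content_length:
--         tmp_line = []
--         if content[i].strip().startswith('#'):
--             tmp_line.append(content[i]) # #で始まる行を追加)
--             i += 1
--             while True:
--                 if i >= content_length:
--                     if len(tmp_line) > 0:
--                         processed_sections.append(tmp_line)
--                     break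
--                 elif content[i].strip().startswith('#'):
--                     processed_sections.append(tmp_line)
--                     break
--                 else:
--                     if content[i].strip():
--                         tmp_line.append(content[i]) # 改行文字・空白文字を無視しない
--                     i += 1
--         else:
--             i += 1 # #で始まらない行はスキップ
--
--     output_prompts = []
--     for genarr in processed_sections:
--         gentext = ',\n'.join(genarr).replace(',,', ',').replace(',  ', ', ')
--         gentext = gentext.strip().strip(',')
--         output_prompts.append(gentext)
--     return output_prompts
-- ===== SOURCE B (Python) =====
-- def process_chunk_string(chunk_string: str):
--     """
--     チャンク文字列をプロンプトリストに変換する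
--     """
--     lines = chunk_string.splitlines()
--     # stage 1: positions of all '#' header lines
--     heads = [i for i, line in enumerate(lines) if line.strip().startswith('#')]
--     # stage 2: each section = its header plus the non-blank lines up to the next header
--     sections = [[lines[s]] + [l for l in lines[s + 1:e] if l.strip()]
--                 for s, e in zip(heads, heads[1:] + [len(lines)])]
--     # stage 3: formatting, unchanged
--     return [',\n'.join(g).replace(',,', ',').replace(',  ', ', ').strip().strip(',')
--             for g in sections]
-- ===== Notes on version B (the rewrite author's own statement) =====
-- stated objective: alternative
-- what changed: Replaced A's outer-while/inner-while index-driven state machine with three staged passes: first collect all '#'-header line positions via enumerate, then build each section by slicing lines between consecutive header positions and filtering blanks, then the unchanged formatting pass.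
import Mathlib
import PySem

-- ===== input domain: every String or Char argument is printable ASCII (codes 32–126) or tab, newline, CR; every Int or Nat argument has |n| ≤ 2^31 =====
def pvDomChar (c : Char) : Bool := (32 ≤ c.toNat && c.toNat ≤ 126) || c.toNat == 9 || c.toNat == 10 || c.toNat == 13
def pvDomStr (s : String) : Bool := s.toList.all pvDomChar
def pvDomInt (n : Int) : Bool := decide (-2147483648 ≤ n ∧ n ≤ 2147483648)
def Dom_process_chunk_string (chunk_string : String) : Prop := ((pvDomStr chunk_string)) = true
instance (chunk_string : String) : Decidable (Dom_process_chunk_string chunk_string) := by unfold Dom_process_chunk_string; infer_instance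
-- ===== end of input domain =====

-- B replaces A's nested while-loop state machine with three staged passes: collect header positions, slice between consecutive headers, format (objective: alternative decomposition).


-- ===== PORT A =====
-- 'line.strip().startswith('#')'
def pvIsHeader (line : String) : Bool := PySem.Str.startswith (PySem.Str.strip line) "#"

-- 'if content[i].strip():' — truthiness of the stripped line
def pvKeep (line : String) : Bool := !(PySem.Str.strip line).isEmpty

-- the inner 'while True' loop: collects non-'#' lines into tmp_line, returns (processed_sections, i) at
-- break; fuel only makes the recursion structural (it never runs out: the loop advances i towards
-- content.length and the caller supplies content.length - i fuel)
def pvInnerA (content : List String) : Nat → Nat → List String → List (List String) → List (List String) × Nat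
  | 0, i, _tmp, acc => (acc, i)
  | fuel + 1, i, tmp, acc =>
    if i ≥ content.length then
      (if tmp.length > 0 then acc ++ [tmp] else acc, i)
    else if pvIsHeader (content.getD i "") then
      (acc ++ [tmp], i)
    else
      pvInnerA content fuel (i + 1)
        (if pvKeep (content.getD i "") then tmp ++ [content.getD i ""] else tmp) acc

-- the outer 'while i < content_length' loop (fuel likewise: every iteration advances i by at least 1)
def pvOuterA (content : List String) : Nat → Nat → List (List String) → List (List String)
  | 0, _i, acc => acc
  | fuel + 1, i, acc =>
    if i < content.length then
      if pvIsHeader (content.getD i "") then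
        let p := pvInnerA content (content.length - i) (i + 1) [content.getD i ""] acc
        pvOuterA content fuel p.2 p.1
      else
        pvOuterA content fuel (i + 1) acc
    else acc

-- the second loop: ',\n'.join(...).replace(',,',',').replace(',  ',', ').strip().strip(',')
def pvFormat (genarr : List String) : String :=
  PySem.Str.stripChars
    (PySem.Str.strip
      (PySem.Str.replace (PySem.Str.replace (PySem.Str.join ",\n" genarr) ",," ",") ",  " ", "))
    ","

def process_chunk_string (chunk_string : String) : List String :=
  (pvOuterA (PySem.Str.splitlines chunk_string)
      ((PySem.Str.splitlines chunk_string).length + 1) 0 []).map pvFormat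

-- ===== PORT B =====
-- '[lines[s]] + [l for l in lines[s+1:e] if l.strip()]' (lines[s] is always in range: s is a position
-- returned by enumerate, hence pyGetD is exact here)
def pvSec (lines : List String) (p : Int × Int) : List String :=
  PySem.List.pyGetD lines p.1 "" ::
    (PySem.List.slice lines (some (p.1 + 1)) (some p.2)).filter pvKeep

def process_chunk_string_alt (chunk_string : String) : List String :=
  let lines := PySem.Str.splitlines chunk_string
  -- heads = [i for i, line in enumerate(lines) if line.strip().startswith('#')]
  let heads := (PySem.List.enumerate lines).filterMap
    (fun p => if pvIsHeader p.2 then some p.1 else none)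
  -- sections = [... for s, e in zip(heads, heads[1:] + [len(lines)])]
  let sections := (heads.zip (heads.drop 1 ++ [(lines.length : Int)])).map (pvSec lines)
  sections.map pvFormat

-- ===== PRECONDITION & SPEC =====
def Spec_process_chunk_string (chunk_string : String) (out : List String) : Prop := out = process_chunk_string_alt chunk_string
instance (chunk_string : String) (out : List String) : Decidable (Spec_process_chunk_string chunk_string out) := by unfold Spec_process_chunk_string; infer_instance

-- ===== CLAIM (what is proved, stated in full; the proofs are below) =====
def Claim_equal_process_chunk_string : Prop := ∀ (chunk_string : String), Dom_process_chunk_string chunk_string → Spec_process_chunk_string chunk_string (process_chunk_string chunk_string)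

-- ===== LEMMAS AND PROOFS =====

-- canonical recursive grouping: both ports are proved equal to it
def pvGroupRec : List String → List (List String)
  | [] => []
  | l :: ls =>
    if pvIsHeader l then
      (l :: (ls.takeWhile (fun x => !pvIsHeader x)).filter pvKeep) ::
        pvGroupRec (ls.dropWhile (fun x => !pvIsHeader x))
    else pvGroupRec ls
termination_by xs => xs.length
decreasing_by
  all_goals simp only [List.length_cons]
  · have := List.length_dropWhile_le (fun x => !pvIsHeader x) ls; omega
  · omega

theorem pvGroupRec_nil : pvGroupRec [] = [] := by rw [pvGroupRec]

theorem pvGroupRec_cons (l : String) (ls : List String) :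
    pvGroupRec (l :: ls) =
      if pvIsHeader l then
        (l :: (ls.takeWhile (fun x => !pvIsHeader x)).filter pvKeep) ::
          pvGroupRec (ls.dropWhile (fun x => !pvIsHeader x))
      else pvGroupRec ls := by rw [pvGroupRec]

theorem pvGroupRec_dropWhile (xs : List String) :
    pvGroupRec (xs.dropWhile (fun x => !pvIsHeader x)) = pvGroupRec xs := by
  induction xs with
  | nil => simp
  | cons l ls ih =>
    by_cases h : pvIsHeader l
    · simp [h]
    · simp [h, pvGroupRec_cons, ih]

-- ---- A's state machine equals pvGroupRec ----

-- intermediate: A as a single fold carrying an optional open group (proof device only)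
def pvStepB (st : List (List String) × Option (List String)) (line : String) :
    List (List String) × Option (List String) :=
  if pvIsHeader line then
    (match st.2 with
     | none => st.1
     | some t => st.1 ++ [t], some [line])
  else
    match st.2 with
    | none => st
    | some t => (st.1, some (if pvKeep line then t ++ [line] else t))

def pvFlushB (st : List (List String) × Option (List String)) : List (List String) :=
  match st.2 with
  | none => st.1
  | some t => st.1 ++ [t]

theorem pvStepB_none_header (acc : List (List String)) (line : String)
    (hh : pvIsHeader line = true) : pvStepB (acc, none) line = (acc, some [line]) := by
  simp [pvStepB, hh]

theorem pvStepB_some_header (acc : List (List String)) (t : List String) (line : String)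
    (hh : pvIsHeader line = true) : pvStepB (acc, some t) line = (acc ++ [t], some [line]) := by
  simp [pvStepB, hh]

theorem pvStepB_none_non (acc : List (List String)) (line : String)
    (hh : pvIsHeader line = false) : pvStepB (acc, none) line = (acc, none) := by
  simp [pvStepB, hh]

theorem pvStepB_some_non (acc : List (List String)) (t : List String) (line : String)
    (hh : pvIsHeader line = false) :
    pvStepB (acc, some t) line = (acc, some (if pvKeep line then t ++ [line] else t)) := by
  simp [pvStepB, hh]

-- main invariant: from any position i (with enough fuel), A's loops equal the fold over the remaining
-- lines — with no open group (cur = none), and, for nonempty tmp, with tmp as the open group.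
theorem pvMain (content : List String) (k : Nat) :
    ∀ i, content.length - i = k → ∀ acc : List (List String),
      (∀ fo, content.length - i < fo →
        pvOuterA content fo i acc = pvFlushB ((content.drop i).foldl pvStepB (acc, none))) ∧
      (∀ tmp : List String, tmp ≠ [] → ∀ fi fo, content.length - i < fi → content.length - i ≤ fo →
        pvOuterA content fo (pvInnerA content fi i tmp acc).2 (pvInnerA content fi i tmp acc).1
          = pvFlushB ((content.drop i).foldl pvStepB (acc, some tmp))) := by
  induction k using Nat.strong_induction_on with
  | _ k ih =>
    intro i hk acc
    by_cases h : i < content.length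
    · have hdrop : content.drop i = content.getD i "" :: content.drop (i + 1) := by
        rw [List.getD_eq_getElem _ _ h]
        exact List.drop_eq_getElem_cons h
      have ih' := ih (content.length - (i + 1)) (by omega) (i + 1) rfl
      constructor
      · intro fo hfo
        obtain ⟨f, rfl⟩ : ∃ f, fo = f + 1 := ⟨fo - 1, by omega⟩
        rw [pvOuterA, if_pos h, hdrop, List.foldl_cons]
        by_cases hh : pvIsHeader (content.getD i "") = true
        · rw [if_pos hh, pvStepB_none_header _ _ hh]
          exact (ih' acc).2 [content.getD i ""] (by simp) _ _ (by omega) (by omega)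
        · rw [if_neg hh, pvStepB_none_non _ _ (by simpa using hh)]
          exact (ih' acc).1 f (by omega)
      · intro tmp htmp fi fo hfi hfo
        obtain ⟨g, rfl⟩ : ∃ g, fi = g + 1 := ⟨fi - 1, by omega⟩
        rw [pvInnerA, if_neg (by omega), hdrop, List.foldl_cons]
        by_cases hh : pvIsHeader (content.getD i "") = true
        · rw [if_pos hh, pvStepB_some_header _ _ _ hh]
          obtain ⟨f, rfl⟩ : ∃ f, fo = f + 1 := ⟨fo - 1, by omega⟩
          rw [pvOuterA, if_pos h, if_pos hh]
          exact (ih' (acc ++ [tmp])).2 [content.getD i ""] (by simp) _ _ (by omega) (by omega)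
        · rw [if_neg hh, pvStepB_some_non _ _ _ (by simpa using hh)]
          have htmp' : (if pvKeep (content.getD i "") then tmp ++ [content.getD i ""] else tmp) ≠ [] := by
            split <;> simp [htmp]
          exact (ih' acc).2 _ htmp' g fo (by omega) (by omega)
    · have hdrop : content.drop i = [] := List.drop_eq_nil_of_le (by omega)
      constructor
      · intro fo hfo
        obtain ⟨f, rfl⟩ : ∃ f, fo = f + 1 := ⟨fo - 1, by omega⟩
        rw [pvOuterA, if_neg h, hdrop]
        simp [pvFlushB]
      · intro tmp htmp fi fo hfi hfo
        obtain ⟨g, rfl⟩ : ∃ g, fi = g + 1 := ⟨fi - 1, by omega⟩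
        rw [pvInnerA, if_pos (by omega), if_pos (List.length_pos_iff.mpr htmp)]
        rw [hdrop]
        match fo with
        | 0 => simp [pvOuterA, pvFlushB]
        | f + 1 => rw [pvOuterA, if_neg h]; simp [pvFlushB]

-- the fold with an open group equals pvGroupRec after flushing
theorem pvFoldSome (lines : List String) : ∀ (t : List String) (acc : List (List String)),
    pvFlushB (lines.foldl pvStepB (acc, some t))
      = acc ++ (t ++ (lines.takeWhile (fun x => !pvIsHeader x)).filter pvKeep) ::
          pvGroupRec (lines.dropWhile (fun x => !pvIsHeader x)) := by
  induction lines with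
  | nil => intro t acc; simp [pvFlushB, pvGroupRec_nil]
  | cons l ls ih =>
    intro t acc
    by_cases h : pvIsHeader l
    · rw [List.foldl_cons, pvStepB_some_header _ _ _ h, ih]
      simp [h, pvGroupRec_cons]
    · rw [List.foldl_cons, pvStepB_some_non _ _ _ (by simpa using h), ih]
      simp only [List.takeWhile_cons, List.dropWhile_cons, h, Bool.not_false, if_pos, List.filter_cons]
      by_cases hk : pvKeep l <;> simp [hk]

theorem pvFoldNone (lines : List String) : ∀ acc : List (List String),
    pvFlushB (lines.foldl pvStepB (acc, none)) = acc ++ pvGroupRec lines := by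
  induction lines with
  | nil => intro acc; simp [pvFlushB, pvGroupRec_nil]
  | cons l ls ih =>
    intro acc
    by_cases h : pvIsHeader l
    · rw [List.foldl_cons, pvStepB_none_header _ _ h, pvFoldSome, pvGroupRec_cons, if_pos h]
      simp
    · rw [List.foldl_cons, pvStepB_none_non _ _ (by simpa using h), ih, pvGroupRec_cons, if_neg h]

-- ---- B's staged slicing equals pvGroupRec ----

-- header positions of xs when its first element sits at absolute index s
def pvHA (xs : List String) (s : Int) : List Int :=
  (PySem.List.enumerate xs s).filterMap (fun p => if pvIsHeader p.2 then some p.1 else none)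

theorem pvHA_nil (s : Int) : pvHA [] s = [] := by
  simp [pvHA, PySem.List.enumerate_nil]

theorem pvHA_cons (x : String) (xs : List String) (s : Int) :
    pvHA (x :: xs) s = (if pvIsHeader x then [s] else []) ++ pvHA xs (s + 1) := by
  by_cases h : pvIsHeader x <;>
    simp [pvHA, PySem.List.enumerate_cons, h]

-- if pvHA xs s is empty there is no header in xs
theorem pvHA_eq_nil (xs : List String) : ∀ s : Int, pvHA xs s = [] →
    ∀ x ∈ xs, pvIsHeader x = false := by
  induction xs with
  | nil => simp
  | cons y ys ih =>
    intro s hnil x hx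
    rw [List.mem_cons] at hx
    rw [pvHA_cons] at hnil
    by_cases h : pvIsHeader y
    · simp [h] at hnil
    · rcases hx with rfl | hx
      · simpa using h
      · exact ih (s + 1) (by simpa [h] using hnil) x hx

-- the first header position determines takeWhile
theorem pvHA_head (xs : List String) : ∀ (s : Nat) (h : Int) (t : List Int),
    pvHA xs (s : Int) = h :: t →
    ∃ k : Nat, h = ((s + k : Nat) : Int) ∧
      xs.takeWhile (fun x => !pvIsHeader x) = xs.take k := by
  induction xs with
  | nil => intro s h t hh; rw [pvHA_nil] at hh; cases hh
  | cons y ys ih =>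
    intro s h t hh
    rw [pvHA_cons] at hh
    by_cases hy : pvIsHeader y
    · simp [hy] at hh
      exact ⟨0, by simp [hh.1], by simp [hy]⟩
    · simp only [hy, if_neg, Bool.false_eq_true, not_false_iff, List.nil_append] at hh
      have : ((s : Int) + 1) = ((s + 1 : Nat) : Int) := by push_cast; ring
      rw [this] at hh
      obtain ⟨k, hk1, hk2⟩ := ih (s + 1) h t hh
      exact ⟨k + 1, by rw [hk1]; congr 1; omega,
        by simp [hy, hk2]⟩

set_option maxHeartbeats 1600000 in
-- B's zipped sections over the suffix L.drop s equal pvGroupRec of that suffix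
theorem pvSecsEq (L : List String) (n : Nat) : ∀ s : Nat, L.length - s = n →
    ((pvHA (L.drop s) (s : Int)).zip
        ((pvHA (L.drop s) (s : Int)).drop 1 ++ [(L.length : Int)])).map (pvSec L)
      = pvGroupRec (L.drop s) := by
  induction n using Nat.strong_induction_on with
  | _ n ih =>
    intro s hn
    by_cases h : s < L.length
    · have hdrop : L.drop s = L[s] :: L.drop (s + 1) := List.drop_eq_getElem_cons h
      have hcast : ((s : Int) + 1) = ((s + 1 : Nat) : Int) := by push_cast; ring
      have ihs := ih (L.length - (s + 1)) (by omega) (s + 1) rfl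
      rw [hdrop, pvHA_cons, hcast]
      by_cases hh : pvIsHeader L[s]
      · rw [if_pos hh]
        have hsec1 : PySem.List.pyGetD L (s : Int) "" = L[s] := by
          rw [PySem.List.pyGetD_natCast]; exact List.getD_eq_getElem L "" h
        rcases hhs : pvHA (L.drop (s + 1)) ((s + 1 : Nat) : Int) with _ | ⟨h0, t0⟩
        · -- no further header: one section to the end of the file
          have hnone := pvHA_eq_nil _ _ hhs
          have htk : (L.drop (s + 1)).takeWhile (fun x => !pvIsHeader x) = L.drop (s + 1) := by
            rw [List.takeWhile_eq_self_iff]; intro a ha; simp [hnone a ha]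
          have hdw : (L.drop (s + 1)).dropWhile (fun x => !pvIsHeader x) = [] := by
            rw [List.dropWhile_eq_nil_iff]; intro a ha; simp [hnone a ha]
          simp only [List.nil_append, List.cons_append, List.drop_succ_cons, List.drop_nil,
            List.zip_cons_cons, List.zip_nil_right, List.map_cons, List.map_nil]
          rw [pvGroupRec_cons, if_pos hh, htk, hdw, pvGroupRec_nil]
          congr 1
          · unfold pvSec
            simp only [hsec1]
            congr 1
            rw [hcast, PySem.List.slice_natCast]
            have hlen : (List.drop (s + 1) L).length ≤ L.length - (s + 1) := by
              rw [List.length_drop]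
            rw [List.take_of_length_le hlen]
        · -- next header at h0
          obtain ⟨k, hk1, hk2⟩ := pvHA_head _ _ _ _ hhs
          simp only [List.cons_append, List.nil_append, List.drop_succ_cons, List.drop_zero,
            List.zip_cons_cons, List.map_cons]
          rw [pvGroupRec_cons, if_pos hh]
          congr 1
          · unfold pvSec
            simp only [hsec1]
            congr 1
            rw [hcast, hk1, PySem.List.slice_natCast, hk2]
            have hk3 : s + 1 + k - (s + 1) = k := by omega
            rw [hk3]
          · rw [hhs] at ihs
            simp only [List.drop_succ_cons, List.drop_zero] at ihs
            rw [ihs, pvGroupRec_dropWhile]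
      · rw [if_neg hh, List.nil_append, pvGroupRec_cons, if_neg hh, ← ihs]
    · have hdrop : L.drop s = [] := List.drop_eq_nil_of_le (by omega)
      rw [hdrop, pvHA_nil, pvGroupRec_nil]
      simp

-- ===== VERDICT (by name: the statement is the Claim_ definition above) =====
theorem process_chunk_string_spec : Claim_equal_process_chunk_string := by
  intro s _
  unfold Spec_process_chunk_string process_chunk_string process_chunk_string_alt
  have hA := (pvMain (PySem.Str.splitlines s) (PySem.Str.splitlines s).length 0 (by omega) []).1
    ((PySem.Str.splitlines s).length + 1) (by omega)
  rw [List.drop_zero] at hA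
  rw [hA, pvFoldNone, List.nil_append]
  have hB := pvSecsEq (PySem.Str.splitlines s) (PySem.Str.splitlines s).length 0 rfl
  rw [List.drop_zero] at hB
  have : pvHA (PySem.Str.splitlines s) ((0 : Nat) : Int)
      = (PySem.List.enumerate (PySem.Str.splitlines s)).filterMap
          (fun p => if pvIsHeader p.2 then some p.1 else none) := by
    simp [pvHA]
  rw [this] at hB
  rw [← hB]
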